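-- pv_equiv track=rewrite | github.com/Elbitty/Elbitty | shopnlp.py | __item_step
-- ===== SOURCE A (Python) =====
-- def __item_step(list_to_step):
--     """List 형 객체 내의 item을 1개 부터 총 item의 갯수 까지 차례대로 추출하여 합성합니다.
--     접근 제어 수준은 private입니다."""
--     temp_stepped_list = \
--         [ \
--             ' '.join(str(val)\
--              for val in list_to_step[:idx + 1 or None]) \
--                 for idx in range(len(list_to_step)) \
--         ]
--     return temp_stepped_list
-- ===== SOURCE B (Python) =====
-- def __item_step(list_to_step):
--     """Single forward pass keeping a running accumulator string instead of
--     re-joining every prefix slice."""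
--     result = []
--     prev = None
--     for val in list_to_step:
--         cur = str(val) if prev is None else prev + ' ' + str(val)
--         result.append(cur)
--         prev = cur
--     return result
-- ===== Notes on version B (the rewrite author's own statement) =====
-- stated objective: faster
-- what changed: Replaces the quadratic slice-and-join comprehension by a single forward pass that extends a running accumulator string with ' ' + value and appends it to the result.
import Mathlib
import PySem

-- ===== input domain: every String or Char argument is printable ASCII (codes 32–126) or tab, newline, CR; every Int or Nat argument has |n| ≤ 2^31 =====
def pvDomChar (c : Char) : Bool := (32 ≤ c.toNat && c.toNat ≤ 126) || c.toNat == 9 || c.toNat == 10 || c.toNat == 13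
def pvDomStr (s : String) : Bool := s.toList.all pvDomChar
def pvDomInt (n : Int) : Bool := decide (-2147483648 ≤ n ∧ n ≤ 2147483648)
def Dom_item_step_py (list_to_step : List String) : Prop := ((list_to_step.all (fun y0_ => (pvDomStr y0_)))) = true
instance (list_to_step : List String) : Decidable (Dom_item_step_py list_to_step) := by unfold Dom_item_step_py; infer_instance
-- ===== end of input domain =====

-- B replaces A's quadratic slice-and-join prefix comprehension by a single forward
-- pass maintaining a running accumulator string (objective: faster, asymptotically).


-- ===== PORT A =====
-- [' '.join(str(val) for val in list_to_step[:idx + 1 or None]) for idx in range(len(list_to_step))]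
-- idx + 1 ≥ 1 is always truthy, so 'idx + 1 or None' is just the bound idx + 1;
-- str(val) on a str is the identity.
def item_step_py (list_to_step : List String) : List String :=
  (PySem.List.pyRange 0 (list_to_step.length : Int) 1).map (fun idx =>
    PySem.Str.join " " (PySem.List.slice list_to_step none (some (idx + 1))))

-- ===== PORT B =====
-- the loop body after the first element: cur = prev + ' ' + val, append, prev = cur
def itemStepGo (prev : String) : List String → List String
  | [] => []
  | v :: rest =>
      let cur := prev ++ " " ++ v
      cur :: itemStepGo cur rest

-- 'prev is None' holds exactly on the first iteration, so split off the head
def item_step_py_alt (list_to_step : List String) : List String :=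
  match list_to_step with
  | [] => []
  | v :: rest => v :: itemStepGo v rest

-- ===== PRECONDITION & SPEC =====
def Spec_item_step_py (list_to_step : List String) (out : List String) : Prop := out = item_step_py_alt list_to_step
instance (list_to_step : List String) (out : List String) : Decidable (Spec_item_step_py list_to_step out) := by unfold Spec_item_step_py; infer_instance

-- ===== CLAIM (what is proved, stated in full; the proofs are below) =====
def Claim_equal_item_step_py : Prop := ∀ (list_to_step : List String), Dom_item_step_py list_to_step → Spec_item_step_py list_to_step (item_step_py list_to_step)

-- ===== LEMMAS AND PROOFS =====

theorem chars_join_snoc (sep v : List Char) :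
    ∀ (ps : List (List Char)) (p : List Char),
      PySem.Chars.join sep (p :: (ps ++ [v])) = PySem.Chars.join sep (p :: ps) ++ sep ++ v := by
  intro ps
  induction ps with
  | nil => intro p; simp [PySem.Chars.join_cons_cons, PySem.Chars.join_singleton]
  | cons q qs ih =>
      intro p
      have h := ih q
      rw [List.cons_append, PySem.Chars.join_cons_cons, PySem.Chars.join_cons_cons sep p q qs, h]
      simp [List.append_assoc]

theorem str_join_snoc (p : String) (ps : List String) (v : String) :
    PySem.Str.join " " (p :: (ps ++ [v])) = PySem.Str.join " " (p :: ps) ++ " " ++ v := by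
  have h := chars_join_snoc (" ".toList) v.toList (ps.map String.toList) p.toList
  apply String.toList_injective
  simp only [PySem.Str.toList_join, String.toList_append, List.map_append, List.map_cons,
    List.map_nil] at h ⊢
  exact h

theorem str_join_singleton (v : String) : PySem.Str.join " " [v] = v := by
  apply String.toList_injective
  simp [PySem.Str.toList_join, PySem.Chars.join_singleton]

theorem itemStepGo_spec (rest : List String) :
    ∀ (p : String) (ps : List String),
      itemStepGo (PySem.Str.join " " (p :: ps)) rest =
        (List.range rest.length).map
          (fun k => PySem.Str.join " " (p :: (ps ++ rest.take (k + 1)))) := by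
  induction rest with
  | nil => intro p ps; simp [itemStepGo]
  | cons v rest ih =>
      intro p ps
      have hsnoc := str_join_snoc p ps v
      have hih := ih p (ps ++ [v])
      simp only [itemStepGo, ← hsnoc]
      rw [hih]
      simp only [List.length_cons, List.range_succ_eq_map, List.map_cons, List.map_map,
        List.cons.injEq]
      constructor
      · simp
      · apply List.map_congr_left
        intro k _
        simp [Function.comp, List.take_succ_cons, List.append_assoc]

theorem item_step_py_take (l : List String) :
    item_step_py l =
      (List.range l.length).map (fun k => PySem.Str.join " " (l.take (k + 1))) := by
  unfold item_step_py
  rw [PySem.List.pyRange_one]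
  rw [List.map_map]
  apply List.map_congr_left
  intro k hk
  have h1 : (0 : Int) ≤ (0 : Int) + (k : Int) + 1 := by omega
  simp only [Function.comp]
  rw [PySem.List.slice_to _ h1]
  have h2 : ((0 : Int) + (k : Int) + 1).toNat = k + 1 := by omega
  rw [h2]

-- ===== VERDICT (by name: the statement is the Claim_ definition above) =====
theorem item_step_py_spec : Claim_equal_item_step_py := by
  intro l _
  unfold Spec_item_step_py
  rw [item_step_py_take]
  match l with
  | [] => simp [item_step_py_alt]
  | v :: rest =>
      simp only [item_step_py_alt]
      have hgo := itemStepGo_spec rest v []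
      rw [str_join_singleton] at hgo
      rw [hgo]
      simp only [List.length_cons, List.range_succ_eq_map, List.map_cons, List.map_map,
        List.cons.injEq]
      constructor
      · simp [str_join_singleton]
      · apply List.map_congr_left
        intro k _
        simp [Function.comp, List.take_succ_cons]
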